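-- pv_equiv track=rewrite | github.com/parallelno/Vector06c | Vector06c_Dev/_Projects/GameNoname/temp/tests/smallDict.py | FindLinerSeqs4
-- ===== SOURCE A (Python) =====
-- def FindLinerSeqs4(data):
-- 	linearSeqs = []
-- 	i = 3
-- 	while i< len(data):
-- 		p1 = data[i-3]
-- 		p2 = data[i-2]
-- 		p3 = data[i-1]
-- 		p4 = data[i]
--
-- 		if p2-p1 == p3-p2 == p4-p3:
-- 			linearSeqs.append((p1, p2, p3, p4))
-- 		i += 1
--
-- 	return linearSeqs
-- ===== SOURCE B (Python) =====
-- def FindLinerSeqs4(data):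
-- 	# Partition the input into maximal runs of equal consecutive differences
-- 	# and emit every 4-element window of each run unconditionally: inside a
-- 	# maximal arithmetic run every window qualifies, and no qualifying window
-- 	# can cross a run boundary (its three differences would not all be equal).
-- 	res = []
-- 	run = []  # current (still growing) maximal arithmetic run
-- 	for x in data:
-- 		if len(run) >= 2 and x - run[-1] != run[1] - run[0]:
-- 			# run is maximal: flush all of its 4-windows, start a new run
-- 			res += zip(run, run[1:], run[2:], run[3:])
-- 			run = [run[-1]]
-- 		run.append(x)
-- 	res += zip(run, run[1:], run[2:], run[3:])
-- 	return res
-- ===== Notes on version B (the rewrite author's own statement) =====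
-- stated objective: alternative
-- what changed: Instead of testing the three differences of every 4-element window, B partitions the input into maximal runs of equal consecutive differences and emits all 4-windows of each run unconditionally (no per-window test).
import Mathlib
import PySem

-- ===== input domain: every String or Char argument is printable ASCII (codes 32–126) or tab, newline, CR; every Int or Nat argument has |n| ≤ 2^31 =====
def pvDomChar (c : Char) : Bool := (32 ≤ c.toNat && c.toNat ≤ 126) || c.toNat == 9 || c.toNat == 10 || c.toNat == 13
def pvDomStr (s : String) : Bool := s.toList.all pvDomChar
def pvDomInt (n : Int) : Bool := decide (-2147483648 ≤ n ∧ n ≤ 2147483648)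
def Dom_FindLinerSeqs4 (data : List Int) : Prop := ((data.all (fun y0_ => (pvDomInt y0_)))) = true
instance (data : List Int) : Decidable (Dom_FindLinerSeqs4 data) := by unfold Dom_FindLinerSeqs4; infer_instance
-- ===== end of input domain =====

-- B partitions the input into maximal runs of equal consecutive differences and emits
-- every 4-window of each run unconditionally, instead of testing each window (alternative).

-- ===== PORT A =====
-- one iteration of A's while body, for index i
def pvAStep (data : List Int) (acc : List (Int × Int × Int × Int)) (i : Int) :
    List (Int × Int × Int × Int) :=
  let p1 := PySem.List.pyGetD data (i - 3) 0
  let p2 := PySem.List.pyGetD data (i - 2) 0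
  let p3 := PySem.List.pyGetD data (i - 1) 0
  let p4 := PySem.List.pyGetD data i 0
  if p2 - p1 == p3 - p2 && p3 - p2 == p4 - p3 then acc ++ [(p1, p2, p3, p4)] else acc

def FindLinerSeqs4 (data : List Int) : List (Int × Int × Int × Int) :=
  (PySem.List.pyRange 3 (data.length : Int) 1).foldl (pvAStep data) []

-- ===== PORT B =====
-- zip(run, run[1:], run[2:], run[3:]) rendered as the 4-window zip
def pvZip4 : List Int → List (Int × Int × Int × Int)
  | a :: b :: c :: d :: t => (a, b, c, d) :: pvZip4 (b :: c :: d :: t)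
  | _ => []

-- one iteration of B's for loop; state = (run, res); run[-1] is getLastD, run[1]/run[0]
-- are only read under the len(run) >= 2 guard (rendered by the match)
def pvBStep (st : List Int × List (Int × Int × Int × Int)) (x : Int) :
    List Int × List (Int × Int × Int × Int) :=
  match st.1 with
  | a :: b :: _ =>
      if x - st.1.getLastD 0 ≠ b - a then
        (st.1.getLastD 0 :: [x], st.2 ++ pvZip4 st.1)
      else (st.1 ++ [x], st.2)
  | _ => (st.1 ++ [x], st.2)

def FindLinerSeqs4_alt (data : List Int) : List (Int × Int × Int × Int) :=
  let st := data.foldl pvBStep ([], [])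
  st.2 ++ pvZip4 st.1

-- ===== PRECONDITION & SPEC =====
def Spec_FindLinerSeqs4 (data : List Int) (out : List (Int × Int × Int × Int)) : Prop := out = FindLinerSeqs4_alt data
instance (data : List Int) (out : List (Int × Int × Int × Int)) : Decidable (Spec_FindLinerSeqs4 data out) := by unfold Spec_FindLinerSeqs4; infer_instance

-- ===== CLAIM (what is proved, stated in full; the proofs are below) =====
def Claim_equal_FindLinerSeqs4 : Prop := ∀ (data : List Int), Dom_FindLinerSeqs4 data → Spec_FindLinerSeqs4 data (FindLinerSeqs4 data)

-- ===== LEMMAS AND PROOFS =====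

-- common characterization: all 4-windows in arithmetic progression, front to back
def pvW : List Int → List (Int × Int × Int × Int)
  | a :: b :: c :: d :: t =>
      (if b - a == c - b && c - b == d - c then [(a, b, c, d)] else []) ++ pvW (b :: c :: d :: t)
  | _ => []

-- A's loop body as a filter predicate and a window builder
def pvP (data : List Int) (i : Int) : Bool :=
  let p1 := PySem.List.pyGetD data (i - 3) 0
  let p2 := PySem.List.pyGetD data (i - 2) 0
  let p3 := PySem.List.pyGetD data (i - 1) 0
  let p4 := PySem.List.pyGetD data i 0
  p2 - p1 == p3 - p2 && p3 - p2 == p4 - p3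

def pvF (data : List Int) (i : Int) : Int × Int × Int × Int :=
  (PySem.List.pyGetD data (i - 3) 0, PySem.List.pyGetD data (i - 2) 0,
   PySem.List.pyGetD data (i - 1) 0, PySem.List.pyGetD data i 0)

theorem pvA_filter (data : List Int) :
    FindLinerSeqs4 data =
      ((PySem.List.pyRange 3 (data.length : Int) 1).filter (pvP data)).map (pvF data) := by
  show (PySem.List.pyRange 3 (data.length : Int) 1).foldl
      (fun acc i => if pvP data i then acc ++ [pvF data i] else acc) [] = _
  rw [PySem.List.foldl_append_if]
  simp

theorem pvGetD_cons_pos (x : Int) (xs : List Int) (i : Int) (h : 0 < i) :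
    PySem.List.pyGetD (x :: xs) i 0 = PySem.List.pyGetD xs (i - 1) 0 := by
  obtain ⟨k, rfl⟩ : ∃ k : Nat, i = (k : Int) + 1 := ⟨(i - 1).toNat, by omega⟩
  have e2 : ((k:Int) + 1).toNat = k + 1 := by omega
  simp only [PySem.List.pyGetD, PySem.List.pyGet?, PySem.List.pyIdx?, List.length_cons]
  push_cast
  split_ifs <;> first | omega | simp [e2]

theorem pvRange_shift (n : Int) :
    PySem.List.pyRange 4 (n + 1) 1 = (PySem.List.pyRange 3 n 1).map (· + 1) := by
  rw [PySem.List.pyRange_one, PySem.List.pyRange_one, List.map_map]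
  have e : (n + 1 - 4).toNat = (n - 3).toNat := by omega
  rw [e]
  exact List.map_congr_left (fun k _ => by simp; ring)

theorem pvP_shift (x : Int) (t : List Int) (i : Int) (h : 3 ≤ i) :
    pvP (x :: t) (i + 1) = pvP t i := by
  simp only [pvP]
  rw [pvGetD_cons_pos _ _ _ (by omega), pvGetD_cons_pos _ _ _ (by omega),
      pvGetD_cons_pos _ _ _ (by omega), pvGetD_cons_pos _ _ _ (by omega)]
  rw [show i + 1 - 3 - 1 = i - 3 by ring, show i + 1 - 2 - 1 = i - 2 by ring,
      show i + 1 - 1 - 1 = i - 1 by ring, show i + 1 - 1 = i by ring]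

theorem pvF_shift (x : Int) (t : List Int) (i : Int) (h : 3 ≤ i) :
    pvF (x :: t) (i + 1) = pvF t i := by
  simp only [pvF]
  rw [pvGetD_cons_pos _ _ _ (by omega), pvGetD_cons_pos _ _ _ (by omega),
      pvGetD_cons_pos _ _ _ (by omega), pvGetD_cons_pos _ _ _ (by omega)]
  rw [show i + 1 - 3 - 1 = i - 3 by ring, show i + 1 - 2 - 1 = i - 2 by ring,
      show i + 1 - 1 - 1 = i - 1 by ring, show i + 1 - 1 = i by ring]

theorem pvA_shift (x : Int) (t : List Int) (h : 3 ≤ t.length) :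
    FindLinerSeqs4 (x :: t) = pvAStep (x :: t) [] 3 ++ FindLinerSeqs4 t := by
  rw [pvA_filter, pvA_filter]
  rw [show (((x :: t).length : Int)) = ((t.length : Int) + 1) by simp]
  rw [PySem.List.pyRange_one_cons (by omega)]
  rw [show (3 : Int) + 1 = 4 by norm_num, pvRange_shift]
  rw [List.filter_cons]
  have hstep : pvAStep (x :: t) [] 3 = if pvP (x :: t) 3 then [pvF (x :: t) 3] else [] := by
    simp only [pvAStep, pvP, pvF]; split_ifs <;> simp_all
  rw [hstep]
  have hfilter : (((PySem.List.pyRange 3 (t.length : Int) 1).map (· + 1)).filter (pvP (x :: t))).map (pvF (x :: t))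
      = ((PySem.List.pyRange 3 (t.length : Int) 1).filter (pvP t)).map (pvF t) := by
    rw [List.filter_map]
    rw [List.filter_congr (fun i hi => by
      have : 3 ≤ i := (PySem.List.mem_pyRange_one.mp hi).1
      simp only [Function.comp]
      rw [pvP_shift _ _ _ this])]
    rw [List.map_map]
    exact List.map_congr_left (fun i hi => by
      have hm : 3 ≤ i := (PySem.List.mem_pyRange_one.mp (List.mem_of_mem_filter hi)).1
      simp only [Function.comp]
      rw [pvF_shift _ _ _ hm])
  split_ifs with hc <;> simp [hfilter]

theorem pvA_eq_W : ∀ data : List Int, FindLinerSeqs4 data = pvW data := by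
  intro data
  induction data with
  | nil => rfl
  | cons x t ih =>
    by_cases h : 3 ≤ t.length
    · obtain ⟨b, c, d, t', rfl⟩ : ∃ b c d t', t = b :: c :: d :: t' := by
        rcases t with _ | ⟨b, _ | ⟨c, _ | ⟨d, t'⟩⟩⟩ <;> simp_all
      rw [pvA_shift _ _ h, ih]
      have g1 : PySem.List.pyGetD (x :: b :: c :: d :: t') ((3:Int) - 3) 0 = x := by
        norm_num [PySem.List.pyGetD_zero_cons]
      have g2 : PySem.List.pyGetD (x :: b :: c :: d :: t') ((3:Int) - 2) 0 = b := by
        rw [show (3:Int) - 2 = 1 by norm_num, pvGetD_cons_pos _ _ _ (by norm_num)]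
        norm_num [PySem.List.pyGetD_zero_cons]
      have g3 : PySem.List.pyGetD (x :: b :: c :: d :: t') ((3:Int) - 1) 0 = c := by
        rw [show (3:Int) - 1 = 2 by norm_num, pvGetD_cons_pos _ _ _ (by norm_num),
            show (2:Int) - 1 = 1 by norm_num, pvGetD_cons_pos _ _ _ (by norm_num)]
        norm_num [PySem.List.pyGetD_zero_cons]
      have g4 : PySem.List.pyGetD (x :: b :: c :: d :: t') (3:Int) 0 = d := by
        rw [pvGetD_cons_pos _ _ _ (by norm_num), show (3:Int) - 1 = 2 by norm_num,
            pvGetD_cons_pos _ _ _ (by norm_num), show (2:Int) - 1 = 1 by norm_num,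
            pvGetD_cons_pos _ _ _ (by norm_num)]
        norm_num [PySem.List.pyGetD_zero_cons]
      have hstep : pvAStep (x :: b :: c :: d :: t') [] 3 =
          (if b - x == c - b && c - b == d - c then [(x, b, c, d)] else []) := by
        simp only [pvAStep, g1, g2, g3, g4]
        split_ifs <;> rfl
      rw [hstep]
      rfl
    · rcases t with _ | ⟨b, _ | ⟨c, _ | ⟨d, t'⟩⟩⟩
      · rfl
      · rfl
      · rfl
      · simp at h

-- ---- B side ----

-- "run is an arithmetic chain with common difference d"
def pvChainB (d : Int) : List Int → Bool
  | a :: b :: t => (b - a == d) && pvChainB d (b :: t)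
  | _ => true

-- getLastD of a nonempty list ignores the default
theorem pvLastD_irrel (l : List Int) (b d d' : Int) : (b :: l).getLastD d = (b :: l).getLastD d' := by
  cases l <;> rfl

theorem pvLast2 (a b : Int) (l : List Int) : (a :: b :: l).getLastD 0 = (b :: l).getLastD 0 :=
  pvLastD_irrel l b a 0

theorem pvChainB_eq (d a b : Int) (l : List Int) :
    pvChainB d (a :: b :: l) = ((b - a == d) && pvChainB d (b :: l)) := rfl

-- every 4-window of an arithmetic chain qualifies
theorem pvZip4_eq_W_of_chain : ∀ (run : List Int) (d : Int), pvChainB d run → pvW run = pvZip4 run := by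
  intro run
  induction run with
  | nil => intro d _; rfl
  | cons a t ih =>
    intro d hc
    rcases t with _ | ⟨b, _ | ⟨c, _ | ⟨e, t'⟩⟩⟩
    · rfl
    · rfl
    · rfl
    · rw [pvChainB_eq, Bool.and_eq_true, beq_iff_eq] at hc
      obtain ⟨h1, hc'⟩ := hc
      have hc'' := hc'
      rw [pvChainB_eq, Bool.and_eq_true, beq_iff_eq] at hc''
      obtain ⟨h2, hc2⟩ := hc''
      have hc3 := hc2
      rw [pvChainB_eq, Bool.and_eq_true, beq_iff_eq] at hc3
      obtain ⟨h3, -⟩ := hc3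
      have hok : (b - a == c - b && c - b == e - c) = true := by
        simp only [Bool.and_eq_true, beq_iff_eq]; omega
      have : pvW (a :: b :: c :: e :: t') = [(a, b, c, e)] ++ pvW (b :: c :: e :: t') := by
        simp [pvW, hok]
      rw [this, ih d hc']
      rfl

theorem pvChain_snoc (d x : Int) : ∀ (run : List Int) (a : Int) (t : List Int), run = a :: t →
    pvChainB d run → x - run.getLastD 0 = d → pvChainB d (run ++ [x]) := by
  intro run a t
  induction t generalizing run a with
  | nil =>
    rintro rfl _ hl
    have hx : x - a = d := hl
    simp [pvChainB, pvChainB_eq, hx]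
  | cons b t' ih =>
    rintro rfl hc hl
    rw [pvChainB_eq, Bool.and_eq_true, beq_iff_eq] at hc
    obtain ⟨h1, hc'⟩ := hc
    have hl' : x - (b :: t').getLastD 0 = d := by rw [← pvLast2 a]; exact hl
    have := ih (b :: t') b rfl hc' hl'
    show pvChainB d (a :: b :: (t' ++ [x])) = true
    rw [pvChainB_eq, Bool.and_eq_true, beq_iff_eq]
    exact ⟨h1, this⟩

-- a break after a chain cuts pvW exactly at the chain's windows
theorem pvW_break : ∀ (rs : List Int) (a b x : Int) (t : List Int),
    pvChainB (b - a) (a :: b :: rs) → x - (a :: b :: rs).getLastD 0 ≠ b - a →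
    pvW (a :: b :: rs ++ x :: t) =
      pvZip4 (a :: b :: rs) ++ pvW ((a :: b :: rs).getLastD 0 :: x :: t) := by
  intro rs
  induction rs with
  | nil =>
    intro a b x t _ hbr
    have hgl : ([a, b] : List Int).getLastD 0 = b := rfl
    rw [hgl] at hbr ⊢
    rcases t with _ | ⟨t0, t'⟩
    · rfl
    · have hfail : ¬ (b - a == x - b && x - b == t0 - x) = true := by
        simp only [Bool.and_eq_true, beq_iff_eq]
        rintro ⟨h1, -⟩; exact hbr (by omega)
      simp [pvW, pvZip4, hfail]
  | cons c rs' ih =>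
    intro a b x t hc hbr
    have hc' : pvChainB (b - a) (b :: c :: rs') := by
      rw [pvChainB_eq, Bool.and_eq_true] at hc; exact hc.2
    have hcb : c - b = b - a := by
      rw [pvChainB_eq, Bool.and_eq_true, beq_iff_eq] at hc'; exact hc'.1
    have hc2 : pvChainB (c - b) (b :: c :: rs') := by rw [hcb]; exact hc'
    have hgl : (a :: b :: c :: rs').getLastD 0 = (b :: c :: rs').getLastD 0 := pvLast2 a b _
    have hbr2 : x - (b :: c :: rs').getLastD 0 ≠ c - b := by
      rw [hcb]; rw [hgl] at hbr; exact hbr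
    have ihh := ih b c x t hc2 hbr2
    rcases rs' with _ | ⟨e, rs''⟩
    · -- run = [a,b,c]; head window (a,b,c,x) fails at its last difference
      have hgl3 : ([b, c] : List Int).getLastD 0 = c := rfl
      rw [hgl3] at ihh
      have hglc : ([a, b, c] : List Int).getLastD 0 = c := rfl
      rw [hglc]
      have hxc : x - c ≠ b - a := by rw [hgl] at hbr; exact hbr
      have hfail : ¬ (b - a == c - b && c - b == x - c) = true := by
        simp only [Bool.and_eq_true, beq_iff_eq]
        rintro ⟨-, h2⟩; exact hxc (by omega)
      show pvW (a :: b :: c :: x :: t) = pvZip4 [a, b, c] ++ pvW (c :: x :: t)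
      have hl : pvW (a :: b :: c :: x :: t) = pvW (b :: c :: x :: t) := by
        simp [pvW, hfail]
      rw [hl]
      simpa [pvZip4] using ihh
    · -- run = a :: b :: c :: e :: …; head window qualifies (three chain differences)
      have hec : e - c = c - b := by
        have := hc2
        rw [pvChainB_eq, Bool.and_eq_true] at this
        have h2 := this.2
        rw [pvChainB_eq, Bool.and_eq_true, beq_iff_eq] at h2
        exact h2.1
      have hok : (b - a == c - b && c - b == e - c) = true := by
        simp only [Bool.and_eq_true, beq_iff_eq]; omega
      have lhs : pvW (a :: b :: c :: e :: rs'' ++ x :: t) =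
          (a, b, c, e) :: pvW (b :: c :: e :: rs'' ++ x :: t) := by
        simp [pvW, hok]
      have rz : pvZip4 (a :: b :: c :: e :: rs'') = (a, b, c, e) :: pvZip4 (b :: c :: e :: rs'') := rfl
      show pvW (a :: b :: c :: e :: rs'' ++ x :: t) = _
      rw [lhs, rz, ihh, pvLast2]
      rfl

-- the fold invariant: from a nonempty chain state, the fold computes res ++ pvW (run ++ t)
theorem pvB_inv : ∀ (t run : List Int) (res : List (Int × Int × Int × Int)) (a : Int) (rs : List Int),
    run = a :: rs → pvChainB ((rs.headD a) - a) run →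
    (let st := t.foldl pvBStep (run, res); st.2 ++ pvZip4 st.1) = res ++ pvW (run ++ t) := by
  intro t
  induction t with
  | nil =>
    intro run res a rs hrun hc
    simp only [List.foldl_nil, List.append_nil]
    rw [pvZip4_eq_W_of_chain run _ hc]
  | cons x t' ih =>
    intro run res a rs hrun hc
    subst hrun
    rcases rs with _ | ⟨b, rs'⟩
    · -- singleton run: the step appends
      have hstep : pvBStep (([a] : List Int), res) x = ([a, x], res) := rfl
      simp only [List.foldl_cons, hstep]
      have := ih [a, x] res a [x] rfl (by simp [pvChainB])
      simpa using this
    · simp only [List.headD_cons] at hc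
      have hstep : pvBStep ((a :: b :: rs'), res) x =
          if x - (a :: b :: rs').getLastD 0 ≠ b - a then
            ((a :: b :: rs').getLastD 0 :: [x], res ++ pvZip4 (a :: b :: rs'))
          else ((a :: b :: rs') ++ [x], res) := rfl
      by_cases hbr : x - (a :: b :: rs').getLastD 0 ≠ b - a
      · -- break: flush the run, restart from its last element
        simp only [List.foldl_cons, hstep, if_pos hbr]
        have hch2 : pvChainB (x - (a :: b :: rs').getLastD 0)
            [(a :: b :: rs').getLastD 0, x] := by simp [pvChainB]
        have := ih [(a :: b :: rs').getLastD 0, x] (res ++ pvZip4 (a :: b :: rs'))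
          ((a :: b :: rs').getLastD 0) [x] rfl (by simpa using hch2)
        simp only [List.cons_append, List.nil_append] at this ⊢
        rw [this, List.append_assoc]
        congr 1
        exact (pvW_break rs' a b x t' hc hbr).symm
      · -- continue: extend the run
        have heq : x - (a :: b :: rs').getLastD 0 = b - a := not_ne_iff.mp hbr
        simp only [List.foldl_cons, hstep, if_neg hbr]
        have hchain' : pvChainB (b - a) ((a :: b :: rs') ++ [x]) :=
          pvChain_snoc _ _ _ a (b :: rs') rfl hc heq
        have hd : ((b :: (rs' ++ [x])).headD a) = b := rfl
        have := ih (a :: b :: (rs' ++ [x])) res a (b :: (rs' ++ [x])) rfl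
          (by rw [hd]; simpa using hchain')
        simp only [List.cons_append] at this ⊢
        rw [this]
        simp

theorem pvB_eq_W : ∀ data : List Int, FindLinerSeqs4_alt data = pvW data := by
  intro data
  rcases data with _ | ⟨a, t⟩
  · rfl
  · show (let st := (a :: t).foldl pvBStep ([], []); st.2 ++ pvZip4 st.1) = _
    have hstep : pvBStep (([] : List Int), ([] : List (Int × Int × Int × Int))) a = ([a], []) := rfl
    simp only [List.foldl_cons, hstep]
    have := pvB_inv t [a] [] a [] rfl (by simp [pvChainB])
    simpa using this

-- ===== VERDICT (by name: the statement is the Claim_ definition above) =====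
theorem FindLinerSeqs4_spec : Claim_equal_FindLinerSeqs4 := by
  intro data _
  unfold Spec_FindLinerSeqs4
  rw [pvA_eq_W, pvB_eq_W]
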